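-- pv_equiv track=rewrite | github.com/darki73/sylvan | src/sylvan/database/orm/runtime/search_helpers.py | prepare_fts_query
-- ===== SOURCE A (Python) =====
-- _FTS5_KEYWORDS = frozenset({"AND", "OR", "NOT", "NEAR"})
--
-- def prepare_fts_query(query: str) -> str:
--     """Clean a user query for FTS5 MATCH.
--
--     Strips special characters, filters FTS5 keywords, and joins terms with OR.
--
--     Args:
--         query: Raw user search string.
--
--     Returns:
--         A sanitized FTS5 query string with terms joined by OR.
--     """
--     clean = ""
--     for ch in query:
--         if ch.isalnum() or ch in (" ", "_", "-"):
--             clean += ch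
--         else:
--             clean += " "
--
--     terms = [t for t in clean.split() if len(t) >= 2 and t.upper() not in _FTS5_KEYWORDS]
--     if not terms:
--         return ""
--     return " OR ".join(terms)
-- ===== SOURCE B (Python) =====
-- _FTS5_KEYWORDS = frozenset({"AND", "OR", "NOT", "NEAR"})
--
--
-- def _is_word(ch):
--     return ch.isalnum() or ch in ("_", "-")
--
--
-- def prepare_fts_query(query: str) -> str:
--     # Run scanner: extract each maximal run of word characters, filter it
--     # immediately, and append it to the output with " OR " on the fly.
--     out = ""
--     n = len(query)
--     i = 0
--     while i < n:
--         if _is_word(query[i]):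
--             j = i + 1
--             while j < n and _is_word(query[j]):
--                 j += 1
--             tok = query[i:j]
--             if len(tok) >= 2 and tok.upper() not in _FTS5_KEYWORDS:
--                 out = tok if not out else out + " OR " + tok
--             i = j
--         else:
--             i += 1
--     return out
-- ===== Notes on version B (the rewrite author's own statement) =====
-- stated objective: alternative
-- what changed: B replaces A's two-stage pipeline (build a sanitized copy of the whole string, then str.split it, then filter a term list and OR-join it) with an index-based run scanner: it walks the string once, extracts each maximal run of word characters in place, filters it immediately, and appends it to the output string with the OR separator on the fly, never materializing a cleaned string or a token list.
import Mathlib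
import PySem

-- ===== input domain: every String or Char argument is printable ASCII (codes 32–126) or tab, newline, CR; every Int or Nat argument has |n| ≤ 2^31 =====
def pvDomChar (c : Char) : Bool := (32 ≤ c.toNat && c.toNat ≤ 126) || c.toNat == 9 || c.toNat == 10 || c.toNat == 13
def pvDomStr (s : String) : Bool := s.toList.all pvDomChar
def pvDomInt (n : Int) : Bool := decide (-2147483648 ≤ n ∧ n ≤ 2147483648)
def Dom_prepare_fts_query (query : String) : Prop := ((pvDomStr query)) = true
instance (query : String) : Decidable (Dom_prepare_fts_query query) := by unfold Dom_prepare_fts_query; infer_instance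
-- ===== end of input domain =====

-- B replaces A's sanitize-copy / split / filter / join pipeline with a single index-based
-- run scanner that builds the output string incrementally; objective: alternative.

-- the module constant _FTS5_KEYWORDS (a literal frozenset, used only for membership tests)
def pvFtsKeywords : List (List Char) :=
  [['A','N','D'], ['O','R'], ['N','O','T'], ['N','E','A','R']]

-- ===== PORT A =====
def prepare_fts_query (query : String) : String :=
  -- clean = ""; for ch in query: clean += ch if allowed else " "
  let clean : List Char := query.toList.foldl
    (fun acc ch =>
      if PySem.Chars.isalnum ch || (ch == ' ' || ch == '_' || ch == '-') then acc ++ [ch]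
      else acc ++ [' ']) []
  -- terms = [t for t in clean.split() if len(t) >= 2 and t.upper() not in _FTS5_KEYWORDS]
  let terms := (PySem.Chars.split₀ clean).filter
    (fun t => decide (2 ≤ t.length) && !pvFtsKeywords.contains (PySem.Chars.upper t))
  if terms.isEmpty then "" else String.ofList (PySem.Chars.join [' ','O','R',' '] terms)

-- ===== PORT B =====
-- B's helper _is_word
def pvWord (ch : Char) : Bool := PySem.Chars.isalnum ch || ch == '_' || ch == '-'

-- B's outer while loop over indices; the inner `while j < n and _is_word(query[j])`
-- and the slice query[i:j] are ported exactly as extracting the maximal word run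
-- (takeWhile) and resuming after it (dropWhile)
def pvScanB : List Char → List Char → List Char
  | [], out => out
  | c :: rest, out =>
    if pvWord c then
      let tok := c :: rest.takeWhile pvWord
      pvScanB (rest.dropWhile pvWord)
        (if decide (2 ≤ tok.length) && !pvFtsKeywords.contains (PySem.Chars.upper tok)
         then (if out.isEmpty then tok else out ++ [' ','O','R',' '] ++ tok)
         else out)
    else pvScanB rest out
termination_by cs _ => cs.length
decreasing_by
  · have := List.length_dropWhile_le (p := pvWord) (l := rest)
    simp only [List.length_cons]; omega
  · simp

def prepare_fts_query_alt (query : String) : String :=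
  String.ofList (pvScanB query.toList [])

-- ===== PRECONDITION & SPEC =====
def Spec_prepare_fts_query (query : String) (out : String) : Prop := out = prepare_fts_query_alt query
instance (query : String) (out : String) : Decidable (Spec_prepare_fts_query query out) := by unfold Spec_prepare_fts_query; infer_instance

-- ===== CLAIM =====
def Claim_equal_prepare_fts_query : Prop := ∀ (query : String), Dom_prepare_fts_query query → Spec_prepare_fts_query query (prepare_fts_query query)

-- ===== LEMMAS AND PROOFS =====

-- A's per-character sanitizer: a kept character stays, everything else (including ' ') becomes a space
def pvSan (ch : Char) : Char := if pvWord ch then ch else ' '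

-- the token sequence both programs produce, as a recursive spec
def pvToks : List Char → List (List Char)
  | [] => []
  | c :: rest =>
    if pvWord c then (c :: rest.takeWhile pvWord) :: pvToks (rest.dropWhile pvWord)
    else pvToks rest
termination_by cs => cs.length
decreasing_by
  · have := List.length_dropWhile_le (p := pvWord) (l := rest)
    simp only [List.length_cons]; omega
  · simp

def pvPred (t : List Char) : Bool :=
  decide (2 ≤ t.length) && !pvFtsKeywords.contains (PySem.Chars.upper t)

def pvSep : List Char := [' ','O','R',' ']

lemma pvSan_pos (c : Char)
    (h : (PySem.Chars.isalnum c || (c == ' ' || c == '_' || c == '-')) = true) : pvSan c = c := by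
  unfold pvSan
  by_cases hk : pvWord c = true
  · simp [hk]
  · have hc : c = ' ' := by
      simp only [pvWord, Bool.or_eq_true, beq_iff_eq] at hk h
      rcases h with h | (h | h) | h
      · exact absurd (Or.inl (Or.inl h)) hk
      · exact h
      · exact absurd (Or.inl (Or.inr h)) hk
      · exact absurd (Or.inr h) hk
    rw [if_neg hk, hc]

lemma pvSan_neg (c : Char)
    (h : (PySem.Chars.isalnum c || (c == ' ' || c == '_' || c == '-')) = false) : pvSan c = ' ' := by
  have hk : pvWord c = false := by
    simp only [Bool.or_eq_false_iff, beq_eq_false_iff_ne] at h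
    simp only [pvWord, Bool.or_eq_false_iff, beq_eq_false_iff_ne]
    exact ⟨⟨h.1, h.2.1.2⟩, h.2.2⟩
  simp [pvSan, hk]

-- a word character is never Python whitespace
lemma pvWord_not_space (ch : Char) (h : pvWord ch = true) : PySem.Chars.isspace ch = false := by
  simp only [pvWord, PySem.Chars.isalnum, PySem.Chars.isalpha, PySem.Chars.isdigit,
    PySem.Chars.isupper, PySem.Chars.islower, Bool.or_eq_true, Bool.and_eq_true,
    decide_eq_true_eq, beq_iff_eq] at h
  have h' : (65 ≤ ch.toNat ∧ ch.toNat ≤ 90) ∨ (97 ≤ ch.toNat ∧ ch.toNat ≤ 122) ∨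
      (48 ≤ ch.toNat ∧ ch.toNat ≤ 57) ∨ ch.toNat = 95 ∨ ch.toNat = 45 := by
    rcases h with (((⟨h1, h2⟩ | ⟨h1, h2⟩) | ⟨h1, h2⟩) | rfl) | rfl
    · exact Or.inl ⟨by simpa using UInt32.le_iff_toNat_le.mp (Char.le_def.mp h1),
        by simpa using UInt32.le_iff_toNat_le.mp (Char.le_def.mp h2)⟩
    · exact Or.inr (Or.inl ⟨by simpa using UInt32.le_iff_toNat_le.mp (Char.le_def.mp h1),
        by simpa using UInt32.le_iff_toNat_le.mp (Char.le_def.mp h2)⟩)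
    · exact Or.inr (Or.inr (Or.inl ⟨by simpa using UInt32.le_iff_toNat_le.mp (Char.le_def.mp h1),
        by simpa using UInt32.le_iff_toNat_le.mp (Char.le_def.mp h2)⟩))
    · exact Or.inr (Or.inr (Or.inr (Or.inl (by decide))))
    · exact Or.inr (Or.inr (Or.inr (Or.inr (by decide))))
  simp only [PySem.Chars.isspace]
  simp only [Bool.or_eq_false_iff, Bool.and_eq_false_iff, decide_eq_false_iff_not]
  omega

lemma pvFoldMap (f : Char → Char) (cs : List Char) (init : List Char) :
    cs.foldl (fun acc ch => acc ++ [f ch]) init = init ++ cs.map f := by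
  induction cs generalizing init with
  | nil => simp
  | cons c rest ih => simp [List.foldl_cons, ih]

-- A's cleaning loop builds exactly the character-wise sanitized string
lemma pvFoldA (cs : List Char) (init : List Char) :
    cs.foldl (fun acc ch =>
      if PySem.Chars.isalnum ch || (ch == ' ' || ch == '_' || ch == '-') then acc ++ [ch]
      else acc ++ [' ']) init = init ++ cs.map pvSan := by
  have hstep : ∀ (acc : List Char), ∀ ch ∈ cs,
      (if PySem.Chars.isalnum ch || (ch == ' ' || ch == '_' || ch == '-') then acc ++ [ch]
       else acc ++ [' ']) = acc ++ [pvSan ch] := by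
    intro acc ch _
    cases h : (PySem.Chars.isalnum ch || (ch == ' ' || ch == '_' || ch == '-')) with
    | true => simp [pvSan_pos ch h]
    | false => simp [pvSan_neg ch h]
  rw [PySem.List.foldl_congr_mem _ _ _ _ hstep]
  exact pvFoldMap pvSan cs init

-- Python's split() of the sanitized string yields exactly the maximal word runs pvToks
lemma pvGo_toks (n : Nat) : ∀ (cs : List Char), cs.length = n →
    (∀ acc, PySem.Chars.split₀.go (cs.map pvSan) [] acc = acc.reverse ++ pvToks cs) ∧
    (∀ (cur : List Char) acc, cur ≠ [] →
      PySem.Chars.split₀.go (cs.map pvSan) cur acc =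
        acc.reverse ++ (cur.reverse ++ cs.takeWhile pvWord) :: pvToks (cs.dropWhile pvWord)) := by
  induction n using Nat.strong_induction_on with
  | _ n ih =>
    intro cs hlen
    cases cs with
    | nil =>
      constructor
      · intro acc; simp [PySem.Chars.split₀.go, pvToks]
      · intro cur acc hcur
        simp [PySem.Chars.split₀.go, List.isEmpty_eq_false_iff.mpr hcur, pvToks]
    | cons c rest =>
      have hr : rest.length < n := by simp at hlen; omega
      have hd : (rest.dropWhile pvWord).length < n := by
        have := List.length_dropWhile_le (p := pvWord) (l := rest); omega
      by_cases hk : pvWord c = true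
      · have hv : pvSan c = c := by simp [pvSan, hk]
        have hs := pvWord_not_space c hk
        constructor
        · intro acc
          simp only [List.map_cons, hv, PySem.Chars.split₀.go, hs, Bool.false_eq_true, if_false]
          rw [((ih rest.length hr rest rfl).2) [c] acc (by simp)]
          simp [pvToks, hk]
        · intro cur acc hcur
          simp only [List.map_cons, hv, PySem.Chars.split₀.go, hs, Bool.false_eq_true, if_false]
          rw [((ih rest.length hr rest rfl).2) (c :: cur) acc (by simp)]
          simp [hk]
      · rw [Bool.not_eq_true] at hk
        have hv : pvSan c = ' ' := by simp [pvSan, hk]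
        have hs : PySem.Chars.isspace ' ' = true := by decide
        constructor
        · intro acc
          simp only [List.map_cons, hv, PySem.Chars.split₀.go, hs, if_true, List.isEmpty_nil]
          rw [((ih rest.length hr rest rfl).1) acc]
          simp [pvToks, hk]
        · intro cur acc hcur
          simp only [List.map_cons, hv, PySem.Chars.split₀.go, hs, if_true,
            List.isEmpty_eq_false_iff.mpr hcur, Bool.false_eq_true, if_false]
          rw [((ih rest.length hr rest rfl).1) (cur.reverse :: acc)]
          simp [pvToks, hk]

-- B's scanner is the fold of the "append with OR" step over the filtered runs
lemma pvScanB_eq_fold (n : Nat) : ∀ (cs : List Char), cs.length = n → ∀ (out : List Char),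
    pvScanB cs out =
      ((pvToks cs).filter pvPred).foldl
        (fun o t => if o.isEmpty then t else o ++ pvSep ++ t) out := by
  induction n using Nat.strong_induction_on with
  | _ n ih =>
    intro cs hlen out
    cases cs with
    | nil => simp [pvScanB, pvToks]
    | cons c rest =>
      have hr : rest.length < n := by simp at hlen; omega
      have hd : (rest.dropWhile pvWord).length < n := by
        have := List.length_dropWhile_le (p := pvWord) (l := rest); omega
      by_cases hk : pvWord c = true
      · rw [pvScanB, pvToks]
        simp only [hk, if_true]
        rw [ih _ hd _ rfl]
        by_cases hp : pvPred (c :: rest.takeWhile pvWord) = true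
        · simp only [List.filter_cons, hp, if_true, List.foldl_cons]
          have : (decide (2 ≤ (c :: rest.takeWhile pvWord).length) &&
              !pvFtsKeywords.contains (PySem.Chars.upper (c :: rest.takeWhile pvWord))) = true := hp
          rw [this]
          rfl
        · rw [Bool.not_eq_true] at hp
          simp only [List.filter_cons, hp, Bool.false_eq_true, if_false]
          have : (decide (2 ≤ (c :: rest.takeWhile pvWord).length) &&
              !pvFtsKeywords.contains (PySem.Chars.upper (c :: rest.takeWhile pvWord))) = false := hp
          rw [this]
          simp
      · rw [Bool.not_eq_true] at hk
        rw [pvScanB, pvToks]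
        simp only [hk, Bool.false_eq_true, if_false]
        exact ih _ hr _ rfl (out := out)

lemma pvFold_ne_nil (ts : List (List Char)) (o : List Char) (ho : o ≠ []) :
    ts.foldl (fun o t => if o.isEmpty then t else o ++ pvSep ++ t) o =
      o ++ ts.flatMap (fun t => pvSep ++ t) := by
  induction ts generalizing o with
  | nil => simp
  | cons t ts ihr =>
    simp only [List.foldl_cons, List.isEmpty_eq_false_iff.mpr ho, Bool.false_eq_true, if_false,
      List.flatMap_cons]
    rw [ihr (o ++ pvSep ++ t) (by simp [pvSep])]
    simp

lemma pvIntercalate (sep t : List Char) (ts : List (List Char)) :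
    sep.intercalate (t :: ts) = t ++ ts.flatMap (fun x => sep ++ x) := by
  induction ts generalizing t with
  | nil => simp [List.intercalate]
  | cons x xs ihr =>
    simp only [List.intercalate, List.intersperse] at *
    simp [List.flatten, ihr x]

-- ===== VERDICT =====
theorem prepare_fts_query_spec : Claim_equal_prepare_fts_query := by
  intro query _
  unfold Spec_prepare_fts_query prepare_fts_query prepare_fts_query_alt
  rw [pvFoldA, List.nil_append]
  simp only [PySem.Chars.split₀]
  rw [((pvGo_toks query.toList.length query.toList rfl).1) [], List.reverse_nil, List.nil_append]
  rw [pvScanB_eq_fold query.toList.length query.toList rfl []]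
  have hfe : (pvToks query.toList).filter
      (fun t => decide (2 ≤ t.length) && !pvFtsKeywords.contains (PySem.Chars.upper t)) =
      (pvToks query.toList).filter pvPred := rfl
  rw [hfe]
  cases hterms : (pvToks query.toList).filter pvPred with
  | nil => simp
  | cons t ts =>
    have ht : t ≠ [] := by
      have hmem : t ∈ (pvToks query.toList).filter pvPred := by rw [hterms]; simp
      have := (List.mem_filter.mp hmem).2
      simp only [pvPred, Bool.and_eq_true, decide_eq_true_eq] at this
      intro h; rw [h] at this; simp at this
    simp only [List.isEmpty_cons, Bool.false_eq_true, if_false, List.foldl_cons,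
      List.isEmpty_nil, if_true]
    rw [pvFold_ne_nil ts t ht]
    simp only [PySem.Chars.join]
    rw [pvIntercalate]
    rfl
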